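-- pv_equiv track=rewrite | github.com/guaiguaide1/sd_for_evolution | code/function/nsga2_tool.py | non_dominated
-- ===== SOURCE A (Python) =====
-- def transfer_objectives(objs):
--     V, M = [], []
--     for obji in objs:
--         Mi, Vi = obji[0], obji[1]
--         M.append(Mi)
--         V.append(Vi)
--     return M, V
--
-- def is_dominated(p, q, M, V):
--     Mp, Mq, Vp, Vq = M[p], M[q], V[p], V[q]
--     if (Mp < Mq and Vp <= Vq) or (Mp <= Mq and Vp < Vq): #p支配q
--         return 1
--     else:
--         return 0
--
-- def non_dominated(objs):
--     M, V = transfer_objectives(objs)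
--     length = len(M)
--     Fi = []
--     for p in range(length):
--         np = 0
--         for q in range(length):
--             if is_dominated(q, p, M, V):
--                 np += 1
--         if np == 0:
--             Fi.append(p)
--     return Fi
-- ===== SOURCE B (Python) =====
-- def non_dominated(objs):
--     # Skyline sweep: per distinct first objective keep the minimal second objective,
--     # scan distinct first objectives in increasing order keeping strictly improving
--     # minima (the Pareto front), then select the indices whose point is on the front.
--     minv = {}
--     for row in objs:
--         M, V = row[0], row[1]
--         if M not in minv or V < minv[M]:
--             minv[M] = V
--     skyline = set()
--     run = None
--     for M in sorted(minv):
--         v = minv[M]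
--         if run is None or v < run:
--             skyline.add((M, v))
--             run = v
--     return [p for p in range(len(objs)) if (objs[p][0], objs[p][1]) in skyline]
-- ===== Notes on version B (the rewrite author's own statement) =====
-- stated objective: faster
-- what changed: Replaces A's all-pairs O(n^2) domination count with a 2D skyline sweep: one pass builds a dict of per-x minima of y, one pass over the sorted distinct x-values keeps the strictly improving minima (the Pareto front), and one membership pass selects the indices.
import Mathlib
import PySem

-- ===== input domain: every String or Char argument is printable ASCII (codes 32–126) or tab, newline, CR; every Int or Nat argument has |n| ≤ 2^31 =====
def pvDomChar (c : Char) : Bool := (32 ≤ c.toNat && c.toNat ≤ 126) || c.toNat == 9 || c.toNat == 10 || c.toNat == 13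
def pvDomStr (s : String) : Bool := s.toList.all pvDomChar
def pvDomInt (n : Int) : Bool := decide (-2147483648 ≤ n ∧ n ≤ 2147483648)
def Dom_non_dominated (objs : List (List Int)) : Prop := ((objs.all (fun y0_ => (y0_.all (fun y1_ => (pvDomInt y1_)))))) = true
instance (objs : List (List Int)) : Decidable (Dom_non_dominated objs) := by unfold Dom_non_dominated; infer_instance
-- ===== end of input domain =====

-- B replaces A's all-pairs domination test by a skyline sweep: per-x-value minima of y
-- collected in one dict pass, one pass over the sorted distinct x-values keeping the
-- strictly improving minima (the Pareto front), then one membership pass over the points.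

-- row accessors shared by both ports: row[0] and row[1] (IndexError on a short row is
-- excluded by Pre_, so the defaulted pyGetD is exact on admitted inputs)
def pvM (r : List Int) : Int := PySem.List.pyGetD r 0 0
def pvV (r : List Int) : Int := PySem.List.pyGetD r 1 0

-- ===== PORT A =====

def pvTransfer (objs : List (List Int)) : List Int × List Int :=
  objs.foldl (fun MV obji =>
    (MV.1 ++ [PySem.List.pyGetD obji 0 0], MV.2 ++ [PySem.List.pyGetD obji 1 0])) ([], [])

def pvIsDominated (p q : Int) (M V : List Int) : Int :=
  let Mp := PySem.List.pyGetD M p 0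
  let Mq := PySem.List.pyGetD M q 0
  let Vp := PySem.List.pyGetD V p 0
  let Vq := PySem.List.pyGetD V q 0
  if (Mp < Mq ∧ Vp ≤ Vq) ∨ (Mp ≤ Mq ∧ Vp < Vq) then 1 else 0

def non_dominated (objs : List (List Int)) : List Int :=
  let MV := pvTransfer objs
  let M := MV.1
  let V := MV.2
  let length := PySem.List.len M
  (PySem.List.pyRange 0 length 1).foldl (fun Fi p =>
    let np : Int := (PySem.List.pyRange 0 length 1).foldl
        (fun np q => if pvIsDominated q p M V ≠ 0 then np + 1 else np) 0
    if np = 0 then Fi ++ [p] else Fi) []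

-- ===== PORT B =====
def pvMinvStep (minv : PySem.Dict Int Int) (row : List Int) : PySem.Dict Int Int :=
  if minv.contains (pvM row) = false ∨ pvV row < minv.getD (pvM row) 0
  then minv.insert (pvM row) (pvV row) else minv

def pvMinv (objs : List (List Int)) : PySem.Dict Int Int :=
  objs.foldl pvMinvStep PySem.Dict.empty

-- one sweep step: keep a sorted distinct x-value iff its minimal y strictly improves the running minimum
def pvSkyStep (minv : PySem.Dict Int Int) (sr : PySem.Set (Int × Int) × Option Int)
    (M : Int) : PySem.Set (Int × Int) × Option Int :=
  let v := minv.getD M 0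
  match sr.2 with
  | none => (sr.1.add (M, v), some v)
  | some run => if v < run then (sr.1.add (M, v), some v) else sr

def pvSkyline (objs : List (List Int)) : PySem.Set (Int × Int) :=
  let minv := pvMinv objs
  ((PySem.List.sorted minv.keys (fun k => k) false).foldl (pvSkyStep minv)
    (PySem.Set.empty, none)).1

def non_dominated_alt (objs : List (List Int)) : List Int :=
  let skyline := pvSkyline objs
  (PySem.List.pyRange 0 (PySem.List.len objs) 1).filter (fun p =>
    skyline.contains (PySem.List.pyGetD (PySem.List.pyGetD objs p []) 0 0,
                      PySem.List.pyGetD (PySem.List.pyGetD objs p []) 1 0))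

-- ===== PRECONDITION & SPEC =====
-- Pre_ excludes exactly the inputs on which A raises IndexError: a row with fewer than 2 entries.
def Pre_non_dominated (objs : List (List Int)) : Prop := ∀ row ∈ objs, 2 ≤ row.length
instance (objs : List (List Int)) : Decidable (Pre_non_dominated objs) := by
  unfold Pre_non_dominated; infer_instance

def pvWitness_non_dominated : List (List Int) := [[0, 1], [1, 0], [2, 2]]

def Spec_non_dominated (objs : List (List Int)) (out : List Int) : Prop := out = non_dominated_alt objs
instance (objs : List (List Int)) (out : List Int) : Decidable (Spec_non_dominated objs out) := by unfold Spec_non_dominated; infer_instance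

-- ===== CLAIM (what is proved, stated in full; the proofs are below) =====
def Claim_equal_non_dominated : Prop := ∀ (objs : List (List Int)), Dom_non_dominated objs → Pre_non_dominated objs → Spec_non_dominated objs (non_dominated objs)

-- ===== LEMMAS AND PROOFS =====

-- running minimum over an optional accumulator (the shape of both min-tracking folds)

def pvOmin (o : Option Int) (v : Int) : Option Int := some (o.elim v (fun a => min a v))

theorem pvOmin_none_iff (vs : List Int) (o : Option Int) :
    vs.foldl pvOmin o = none ↔ o = none ∧ vs = [] := by
  induction vs generalizing o with
  | nil => simp
  | cons v vs ih => simp [pvOmin, ih]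

theorem pvOmin_spec (vs : List Int) (o : Option Int) (m : Int)
    (h : vs.foldl pvOmin o = some m) :
    (o = some m ∨ m ∈ vs) ∧ (∀ v ∈ vs, m ≤ v) ∧ (∀ a, o = some a → m ≤ a) := by
  induction vs generalizing o with
  | nil => simp_all
  | cons v vs ih =>
    simp only [List.foldl_cons] at h
    obtain ⟨h1, h2, h3⟩ := ih _ h
    cases o with
    | none =>
      simp only [pvOmin, Option.elim] at h1 h3
      have hm : m = v ∨ m ∈ vs := by
        rcases h1 with h1 | h1
        · left; exact (Option.some_inj.mp h1).symm
        · right; exact h1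
      have hmem : m ∈ v :: vs := by
        rcases hm with rfl | hm
        · exact List.mem_cons_self ..
        · exact List.mem_cons_of_mem _ hm
      refine ⟨Or.inr hmem, ?_, by simp⟩
      intro w hw
      rcases List.mem_cons.mp hw with rfl | hw
      · have := h3 _ rfl; omega
      · exact h2 _ hw
    | some a =>
      simp only [pvOmin, Option.elim] at h1 h3
      have hma : m ≤ min a v := h3 _ rfl
      refine ⟨?_, ?_, ?_⟩
      · rcases h1 with h1 | h1
        · rw [Option.some_inj] at h1
          rcases le_total a v with hav | hav
          · left; rw [min_eq_left hav] at h1; rw [h1]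
          · right; rw [min_eq_right hav] at h1; rw [← h1]; exact List.mem_cons_self ..
        · right; exact List.mem_cons_of_mem _ h1
      · intro w hw
        rcases List.mem_cons.mp hw with rfl | hw
        · have := min_le_right a w; omega
        · exact h2 _ hw
      · intro b hb
        cases hb
        have := min_le_left a v; omega

theorem pvMinvStep_get?_self (d : PySem.Dict Int Int) (r : List Int) :
    (pvMinvStep d r).get? (pvM r) = pvOmin (d.get? (pvM r)) (pvV r) := by
  unfold pvMinvStep
  by_cases hc : d.contains (pvM r) = false
  · have hnone : d.get? (pvM r) = none := (PySem.Dict.get?_eq_none_iff_contains _ _).2 hc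
    rw [if_pos (Or.inl hc), PySem.Dict.get?_insert_self, hnone]
    rfl
  · have hc' : d.contains (pvM r) = true := by simpa using hc
    obtain ⟨a, ha⟩ : ∃ a, d.get? (pvM r) = some a := by
      cases h : d.get? (pvM r) with
      | none => exact absurd ((PySem.Dict.get?_eq_none_iff_contains _ _).1 h) (by simp [hc'])
      | some a => exact ⟨a, rfl⟩
    have hgd : d.getD (pvM r) 0 = a := by rw [PySem.Dict.getD_eq_get?_getD, ha]; rfl
    by_cases hlt : pvV r < a
    · rw [if_pos (Or.inr (hgd ▸ hlt)), PySem.Dict.get?_insert_self, ha]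
      simp [pvOmin, min_eq_right hlt.le]
    · rw [if_neg (by rw [hgd]; simp [hc', hlt]), ha]
      simp [pvOmin, min_eq_left (by omega : a ≤ pvV r)]

theorem pvMinvStep_get?_ne (d : PySem.Dict Int Int) (r : List Int) (K : Int)
    (h : pvM r ≠ K) : (pvMinvStep d r).get? K = d.get? K := by
  unfold pvMinvStep
  split
  · exact PySem.Dict.get?_insert_of_ne d _ (fun hh => h hh.symm)
  · rfl

theorem pvMinv_get? (objs : List (List Int)) (d : PySem.Dict Int Int) (K : Int) :
    (objs.foldl pvMinvStep d).get? K
      = ((objs.filter (fun r => decide (pvM r = K))).map pvV).foldl pvOmin (d.get? K) := by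
  induction objs generalizing d with
  | nil => simp
  | cons r rs ih =>
    simp only [List.foldl_cons]
    rw [ih]
    by_cases hK : pvM r = K
    · subst hK
      rw [pvMinvStep_get?_self]
      simp
    · rw [pvMinvStep_get?_ne d r K hK]
      simp [hK]

theorem pvMinv_keys_nodup_aux (objs : List (List Int)) (d : PySem.Dict Int Int)
    (h : d.keys.Nodup) : (objs.foldl pvMinvStep d).keys.Nodup := by
  induction objs generalizing d with
  | nil => exact h
  | cons r rs ih =>
    refine ih _ ?_
    unfold pvMinvStep
    split
    · exact PySem.Dict.nodup_keys_insert _ _ _ h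
    · exact h

theorem pvMinv_keys_nodup (objs : List (List Int)) : (pvMinv objs).keys.Nodup := by
  refine pvMinv_keys_nodup_aux _ _ ?_
  simp [PySem.Dict.keys_empty]

theorem pvMinv_get?_empty (objs : List (List Int)) (K : Int) :
    (pvMinv objs).get? K
      = ((objs.filter (fun r => decide (pvM r = K))).map pvV).foldl pvOmin none := by
  unfold pvMinv
  rw [pvMinv_get? objs PySem.Dict.empty K]
  simp [PySem.Dict.get?_empty]

theorem pvMinv_mem_keys (objs : List (List Int)) (K : Int) :
    K ∈ (pvMinv objs).keys ↔ ∃ r ∈ objs, pvM r = K := by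
  rw [← not_iff_not, ← PySem.Dict.get?_eq_none_iff_not_mem_keys, pvMinv_get?_empty,
    pvOmin_none_iff]
  simp [List.filter_eq_nil_iff]

theorem pvMinv_getD_spec (objs : List (List Int)) (K : Int) (h : ∃ r ∈ objs, pvM r = K) :
    (∃ r ∈ objs, pvM r = K ∧ pvV r = (pvMinv objs).getD K 0) ∧
    (∀ r ∈ objs, pvM r = K → (pvMinv objs).getD K 0 ≤ pvV r) := by
  obtain ⟨a, ha⟩ : ∃ a, (pvMinv objs).get? K = some a := by
    cases hh : (pvMinv objs).get? K with
    | none =>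
      rw [pvMinv_get?_empty, pvOmin_none_iff] at hh
      have hfil : objs.filter (fun r => decide (pvM r = K)) = [] := by
        simpa using hh.2
      obtain ⟨r, hr, hrK⟩ := h
      have : r ∈ objs.filter (fun r => decide (pvM r = K)) := by
        simp [List.mem_filter, hr, hrK]
      rw [hfil] at this
      simp at this
    | some a => exact ⟨a, rfl⟩
  have hgd : (pvMinv objs).getD K 0 = a := by
    rw [PySem.Dict.getD_eq_get?_getD, ha]; rfl
  have := pvOmin_spec _ _ _ (by rw [← pvMinv_get?_empty, ha])
  obtain ⟨h1, h2, _⟩ := this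
  rcases h1 with h1 | h1
  · exact absurd h1 (by simp)
  · rw [List.mem_map] at h1
    obtain ⟨r, hrf, hrv⟩ := h1
    rw [List.mem_filter] at hrf
    constructor
    · exact ⟨r, hrf.1, by simpa using hrf.2, by rw [hgd, hrv]⟩
    · intro r hr hrK
      rw [hgd]
      exact h2 _ (List.mem_map_of_mem (by simp [List.mem_filter, hr, hrK]))

-- sweep invariant

def pvOLt (o : Option Int) (v : Int) : Prop := ∀ a, o = some a → v < a

theorem pvSky_fold (minv : PySem.Dict Int Int) (ks : List Int)
    (s : PySem.Set (Int × Int)) (run : Option Int) (hp : ks.Pairwise (· < ·))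
    (x : Int × Int) :
    x ∈ (ks.foldl (pvSkyStep minv) (s, run)).1 ↔
      x ∈ s ∨ ∃ k ∈ ks, x = (k, minv.getD k 0) ∧ pvOLt run (minv.getD k 0) ∧
        ∀ k' ∈ ks, k' < k → minv.getD k 0 < minv.getD k' 0 := by
  induction ks generalizing s run with
  | nil => simp
  | cons k ks ih =>
    rw [List.pairwise_cons] at hp
    obtain ⟨hk, hp⟩ := hp
    simp only [List.foldl_cons]
    have hstep_pos : pvOLt run (minv.getD k 0) →
        pvSkyStep minv (s, run) k = (s.add (k, minv.getD k 0), some (minv.getD k 0)) := by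
      intro hkeep
      unfold pvSkyStep
      cases run with
      | none => simp
      | some a => simp [hkeep a rfl]
    have hstep_neg : ¬ pvOLt run (minv.getD k 0) →
        pvSkyStep minv (s, run) k = (s, run) := by
      intro hkeep
      unfold pvSkyStep
      cases run with
      | none => exact absurd (by intro a ha; cases ha) hkeep
      | some a =>
        have : ¬ minv.getD k 0 < a := by
          intro hlt
          exact hkeep (by intro b hb; cases hb; exact hlt)
        simp [this]
    by_cases hkeep : pvOLt run (minv.getD k 0)
    · rw [hstep_pos hkeep]
      rw [ih _ _ hp]
      constructor
      · rintro (hs | ⟨k'', hk'', hx, holt, hall⟩)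
        · rw [PySem.Set.mem_add] at hs
          rcases hs with hs | rfl
          · exact Or.inl hs
          · refine Or.inr ⟨k, List.mem_cons_self .., rfl, hkeep, ?_⟩
            intro k' hk' hlt'
            rcases List.mem_cons.mp hk' with rfl | hk'
            · omega
            · exact absurd hlt' (by have := hk _ hk'; omega)
        · refine Or.inr ⟨k'', List.mem_cons_of_mem _ hk'', hx, ?_, ?_⟩
          · intro a ha
            have h1 := holt (minv.getD k 0) rfl
            have h2 := hkeep a ha
            omega
          · intro k' hk' hlt'
            rcases List.mem_cons.mp hk' with rfl | hk'
            · exact holt _ rfl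
            · exact hall _ hk' hlt'
      · rintro (hs | ⟨k'', hk'', hx, holt, hall⟩)
        · exact Or.inl (by rw [PySem.Set.mem_add]; exact Or.inl hs)
        · rcases List.mem_cons.mp hk'' with rfl | hk''
          · exact Or.inl (by rw [PySem.Set.mem_add]; exact Or.inr hx)
          · refine Or.inr ⟨k'', hk'', hx, ?_, ?_⟩
            · intro a ha
              cases ha
              exact hall _ (List.mem_cons_self ..) (hk _ hk'')
            · intro k' hk' hlt'
              exact hall _ (List.mem_cons_of_mem _ hk') hlt'
    · rw [hstep_neg hkeep]
      rw [ih _ _ hp]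
      obtain ⟨a, ha, hge⟩ : ∃ a, run = some a ∧ a ≤ minv.getD k 0 := by
        unfold pvOLt at hkeep
        push Not at hkeep
        obtain ⟨a, ha, h⟩ := hkeep
        exact ⟨a, ha, by omega⟩
      constructor
      · rintro (hs | ⟨k'', hk'', hx, holt, hall⟩)
        · exact Or.inl hs
        · refine Or.inr ⟨k'', List.mem_cons_of_mem _ hk'', hx, holt, ?_⟩
          intro k' hk' hlt'
          rcases List.mem_cons.mp hk' with rfl | hk'
          · have := holt a ha; omega
          · exact hall _ hk' hlt'
      · rintro (hs | ⟨k'', hk'', hx, holt, hall⟩)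
        · exact Or.inl hs
        · rcases List.mem_cons.mp hk'' with rfl | hk''
          · exact absurd holt hkeep
          · refine Or.inr ⟨k'', hk'', hx, holt, ?_⟩
            intro k' hk' hlt'
            exact hall _ (List.mem_cons_of_mem _ hk') hlt'

theorem pvKs_pairwise (objs : List (List Int)) :
    (PySem.List.sorted (pvMinv objs).keys (fun k => k) false).Pairwise (· < ·) := by
  have h1 := PySem.List.sorted_pairwise (pvMinv objs).keys (fun k => k)
  have h2 : (PySem.List.sorted (pvMinv objs).keys (fun k => k) false).Nodup :=
    ((PySem.List.sorted_perm (pvMinv objs).keys (fun k => k) false).nodup_iff).mpr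
      (pvMinv_keys_nodup objs)
  exact (h1.and h2).imp (fun h => lt_of_le_of_ne h.1 h.2)

theorem pvKs_mem (objs : List (List Int)) (K : Int) :
    K ∈ PySem.List.sorted (pvMinv objs).keys (fun k => k) false ↔ ∃ r ∈ objs, pvM r = K := by
  rw [(PySem.List.sorted_perm (pvMinv objs).keys (fun k => k) false).mem_iff]
  exact pvMinv_mem_keys objs K

theorem pvSkyline_mem (objs : List (List Int)) (x : Int × Int) :
    x ∈ pvSkyline objs ↔
      (∀ r ∈ objs, pvM r = x.1 → x.2 ≤ pvV r) ∧
      (∃ r ∈ objs, pvM r = x.1 ∧ pvV r = x.2) ∧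
      (∀ r ∈ objs, pvM r < x.1 → x.2 < pvV r) := by
  unfold pvSkyline
  rw [pvSky_fold (pvMinv objs) _ _ _ (pvKs_pairwise objs) x]
  have hmt : x ∉ (PySem.Set.empty : PySem.Set (Int × Int)) := by
    simp [PySem.Set.empty]
  constructor
  · rintro (hs | ⟨k, hk, hx, -, hall⟩)
    · exact absurd hs hmt
    · rw [pvKs_mem] at hk
      have hx1 : x.1 = k := by rw [hx]
      have hx2 : x.2 = (pvMinv objs).getD k 0 := by rw [hx]
      obtain ⟨⟨r0, hr0, hr0K, hr0V⟩, hlb⟩ := pvMinv_getD_spec objs k hk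
      refine ⟨?_, ⟨r0, hr0, by omega, by omega⟩, ?_⟩
      · intro r hr hrK
        have := hlb r hr (by omega)
        omega
      · intro r hr hrlt
        have hK' : ∃ r' ∈ objs, pvM r' = pvM r := ⟨r, hr, rfl⟩
        obtain ⟨-, hlb'⟩ := pvMinv_getD_spec objs (pvM r) hK'
        have h1 := hall (pvM r) ((pvKs_mem objs (pvM r)).mpr hK') (by omega)
        have h2 := hlb' r hr rfl
        omega
  · rintro ⟨hub, ⟨r0, hr0, hr0K, hr0V⟩, hlt⟩
    have hk : ∃ r ∈ objs, pvM r = x.1 := ⟨r0, hr0, hr0K⟩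
    obtain ⟨⟨r1, hr1, hr1K, hr1V⟩, hlb⟩ := pvMinv_getD_spec objs x.1 hk
    have hx2 : x.2 = (pvMinv objs).getD x.1 0 := by
      have h1 := hub r1 hr1 hr1K
      have h2 := hlb r0 hr0 hr0K
      omega
    refine Or.inr ⟨x.1, (pvKs_mem objs x.1).mpr hk, ?_, ?_, ?_⟩
    · rw [← hx2]
    · intro a ha; cases ha
    · intro k' hk' hklt
      rw [pvKs_mem] at hk'
      obtain ⟨⟨r2, hr2, hr2K, hr2V⟩, -⟩ := pvMinv_getD_spec objs k' hk'
      have := hlt r2 hr2 (by omega)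
      omega

theorem pvTransfer_eq (objs : List (List Int)) :
    pvTransfer objs = (objs.map pvM, objs.map pvV) := by
  unfold pvTransfer
  rw [PySem.List.foldl_prod_mk (f := fun acc r => acc ++ [PySem.List.pyGetD r 0 0])
    (g := fun acc r => acc ++ [PySem.List.pyGetD r 1 0])]
  rw [PySem.List.foldl_append_singleton_eq_map, PySem.List.foldl_append_singleton_eq_map]
  rfl

-- the inner loop of A counts dominators of p; it is zero iff no row dominates row p

theorem pv_np_zero_iff (objs : List (List Int)) (p : Int) (h0 : 0 ≤ p)
    (h1 : p < (objs.length : Int)) :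
    ((PySem.List.pyRange 0 (objs.length : Int) 1).foldl
        (fun np q => if pvIsDominated q p (objs.map pvM) (objs.map pvV) ≠ 0 then np + 1 else np)
        (0 : Int) = 0)
      ↔ ∀ r ∈ objs, ¬ ((pvM r < pvM (objs[p.toNat]'(by omega)) ∧ pvV r ≤ pvV (objs[p.toNat]'(by omega))) ∨
          (pvM r ≤ pvM (objs[p.toNat]'(by omega)) ∧ pvV r < pvV (objs[p.toNat]'(by omega)))) := by
  rw [PySem.List.foldl_ite_add_one
    (p := fun q => pvIsDominated q p (objs.map pvM) (objs.map pvV) ≠ 0)]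
  have hp : p.toNat < objs.length := by omega
  have hMp : PySem.List.pyGetD (objs.map pvM) p 0 = pvM (objs[p.toNat]'hp) := by
    rw [PySem.List.pyGetD_eq_getElem _ _ h0 (by simpa using h1)]
    simp
  have hVp : PySem.List.pyGetD (objs.map pvV) p 0 = pvV (objs[p.toNat]'hp) := by
    rw [PySem.List.pyGetD_eq_getElem _ _ h0 (by simpa using h1)]
    simp
  rw [show ((0 : Int) + ((PySem.List.pyRange 0 (objs.length : Int) 1).countP
      (fun q => decide (pvIsDominated q p (objs.map pvM) (objs.map pvV) ≠ 0))) = 0)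
      ↔ ((PySem.List.pyRange 0 (objs.length : Int) 1).countP
      (fun q => decide (pvIsDominated q p (objs.map pvM) (objs.map pvV) ≠ 0))) = 0 from by omega]
  rw [List.countP_eq_zero]
  constructor
  · intro h r hr
    obtain ⟨j, hj, hjr⟩ := List.mem_iff_getElem.mp hr
    have hq : (j : Int) ∈ PySem.List.pyRange 0 (objs.length : Int) 1 := by
      rw [PySem.List.mem_pyRange_one]
      constructor <;> [positivity; exact_mod_cast hj]
    have := h _ hq
    simp only [decide_eq_true_eq, not_not] at this
    unfold pvIsDominated at this
    rw [hMp, hVp] at this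
    have hMq : PySem.List.pyGetD (objs.map pvM) (j : Int) 0 = pvM r := by
      rw [PySem.List.pyGetD_eq_getElem _ _ (by positivity) (by simpa using hj)]
      simp [hjr]
    have hVq : PySem.List.pyGetD (objs.map pvV) (j : Int) 0 = pvV r := by
      rw [PySem.List.pyGetD_eq_getElem _ _ (by positivity) (by simpa using hj)]
      simp [hjr]
    rw [hMq, hVq] at this
    intro hcontra
    rw [if_pos hcontra] at this
    exact one_ne_zero this
  · intro h q hq
    rw [PySem.List.mem_pyRange_one] at hq
    have hjq : q.toNat < objs.length := by omega
    have hr : objs[q.toNat] ∈ objs := List.getElem_mem _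
    have := h _ hr
    simp only [decide_eq_true_eq, not_not]
    unfold pvIsDominated
    rw [hMp, hVp]
    have hMq : PySem.List.pyGetD (objs.map pvM) q 0 = pvM (objs[q.toNat]'hjq) := by
      rw [PySem.List.pyGetD_eq_getElem _ _ (by omega) (by simpa using hq.2)]
      simp
    have hVq : PySem.List.pyGetD (objs.map pvV) q 0 = pvV (objs[q.toNat]'hjq) := by
      rw [PySem.List.pyGetD_eq_getElem _ _ (by omega) (by simpa using hq.2)]
      simp
    rw [hMq, hVq, if_neg this]

theorem pv_main (objs : List (List Int)) : non_dominated objs = non_dominated_alt objs := by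
  have hlen : PySem.List.len (objs.map pvM) = (objs.length : Int) := by
    simp [PySem.List.len_eq]
  unfold non_dominated non_dominated_alt
  rw [pvTransfer_eq]
  simp only [hlen, PySem.List.len_eq]
  rw [PySem.List.foldl_append_ite_eq_filter
    (p := fun p => (PySem.List.pyRange 0 (objs.length : Int) 1).foldl
        (fun np q => if pvIsDominated q p (objs.map pvM) (objs.map pvV) ≠ 0 then np + 1 else np)
        (0 : Int) = 0)]
  rw [List.nil_append]
  apply List.filter_congr
  intro p hp
  rw [PySem.List.mem_pyRange_one] at hp
  have hnat : p.toNat < objs.length := by omega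
  have hrow : PySem.List.pyGetD objs p [] = objs[p.toNat]'hnat :=
    PySem.List.pyGetD_eq_getElem _ _ hp.1 (by simpa using hp.2)
  rw [Bool.eq_iff_iff]
  rw [decide_eq_true_iff, PySem.Set.contains_iff]
  rw [pv_np_zero_iff objs p hp.1 hp.2, hrow, pvSkyline_mem]
  simp only [pvM, pvV]
  constructor
  · intro h
    refine ⟨?_, ⟨objs[p.toNat]'hnat, List.getElem_mem _, rfl, rfl⟩, ?_⟩
    · intro r hr hrK
      have := h r hr
      omega
    · intro r hr hrlt
      have := h r hr
      omega
  · rintro ⟨hub, -, hlt⟩ r hr hd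
    rcases hd with ⟨hm, hv⟩ | ⟨hm, hv⟩
    · have := hlt r hr hm
      omega
    · rcases eq_or_lt_of_le hm with heq | hltm
      · have := hub r hr heq
        omega
      · have := hlt r hr hltm
        omega

-- ===== VERDICT (by name: the statement is the Claim_ definition above) =====
theorem non_dominated_spec : Claim_equal_non_dominated := by
  intro objs _hdom _hpre
  unfold Spec_non_dominated
  exact pv_main objs
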